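-- pv_equiv track=rewrite | github.com/water-vapor/synth-rearc | synth_rearc/tasks/task_34cfa167/helpers.py | horizontal_cycle_34cfa167
-- ===== SOURCE A (Python) =====
-- def horizontal_cycle_34cfa167(
--     length: int,
--     lead: int,
--     tail: int,
--     bg: int,
-- ) -> tuple[int, ...]:
--     period = (lead, bg, tail, bg)
--     return tuple(period[idx % 4] for idx in range(length))
-- ===== SOURCE B (Python) =====
-- def horizontal_cycle_34cfa167(
--     length: int,
--     lead: int,
--     tail: int,
--     bg: int,
-- ) -> tuple[int, ...]:
--     if length <= 0:
--         return ()
--     period = (lead, bg, tail, bg)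
--     q, r = divmod(length, 4)
--     return period * q + period[:r]
-- ===== Notes on version B (the rewrite author's own statement) =====
-- stated objective: idiomatic
-- what changed: B builds the result by tuple repetition plus a tail slice (length//4 full periods and period[:length%4]) instead of indexing the period element-by-element with idx % 4 over range(length).
import Mathlib
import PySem

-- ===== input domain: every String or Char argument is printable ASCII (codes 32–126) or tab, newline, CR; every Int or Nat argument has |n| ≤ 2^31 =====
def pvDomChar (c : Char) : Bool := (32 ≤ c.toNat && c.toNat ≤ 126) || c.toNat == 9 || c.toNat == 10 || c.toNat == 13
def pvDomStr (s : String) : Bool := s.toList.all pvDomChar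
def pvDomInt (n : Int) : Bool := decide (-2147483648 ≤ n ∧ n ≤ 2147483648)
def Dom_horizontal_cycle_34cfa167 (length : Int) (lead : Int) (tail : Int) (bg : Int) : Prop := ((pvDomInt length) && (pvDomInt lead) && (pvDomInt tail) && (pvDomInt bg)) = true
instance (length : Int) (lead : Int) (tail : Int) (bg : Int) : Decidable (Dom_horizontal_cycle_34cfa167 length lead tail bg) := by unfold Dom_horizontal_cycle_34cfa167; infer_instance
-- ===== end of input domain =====

-- B replaces A's per-element `period[idx % 4]` indexing over range(length) with
-- whole-period repetition plus a tail slice (idiomatic; same O(n) cost).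

-- ===== PORT A =====
def horizontal_cycle_34cfa167 (length : Int) (lead : Int) (tail : Int) (bg : Int) : List Int :=
  let period : List Int := [lead, bg, tail, bg]
  (PySem.List.pyRange 0 length 1).map
    (fun idx => PySem.List.pyGetD period (PySem.Int.mod idx 4) 0)

-- ===== PORT B =====
def horizontal_cycle_34cfa167_alt (length : Int) (lead : Int) (tail : Int) (bg : Int) : List Int :=
  if length ≤ 0 then []
  else
    let period : List Int := [lead, bg, tail, bg]
    let q := PySem.Int.floordiv length 4
    let r := PySem.Int.mod length 4
    (List.replicate q.toNat period).flatten ++ PySem.List.slice period none (some r)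

-- ===== PRECONDITION & SPEC =====
def Spec_horizontal_cycle_34cfa167 (length : Int) (lead : Int) (tail : Int) (bg : Int) (out : List Int) : Prop := out = horizontal_cycle_34cfa167_alt length lead tail bg
instance (length : Int) (lead : Int) (tail : Int) (bg : Int) (out : List Int) : Decidable (Spec_horizontal_cycle_34cfa167 length lead tail bg out) := by unfold Spec_horizontal_cycle_34cfa167; infer_instance

-- ===== CLAIM (what is proved, stated in full; the proofs are below) =====
def Claim_equal_horizontal_cycle_34cfa167 : Prop := ∀ (length : Int) (lead : Int) (tail : Int) (bg : Int), Dom_horizontal_cycle_34cfa167 length lead tail bg → Spec_horizontal_cycle_34cfa167 length lead tail bg (horizontal_cycle_34cfa167 length lead tail bg)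

-- ===== LEMMAS AND PROOFS =====

-- core fact: mapping `period.getD (k % 4)` over range (4*q + r), r < 4, is q copies
-- of the period followed by its first r elements
theorem pv_cycle_core (period : List Int) (hlen : period.length = 4) (q r : Nat) (hr : r < 4) :
    (List.range (4 * q + r)).map (fun k => period.getD (k % 4) 0)
      = (List.replicate q period).flatten ++ period.take r := by
  induction q with
  | zero =>
      simp only [Nat.mul_zero, Nat.zero_add, List.replicate_zero, List.flatten_nil, List.nil_append]
      match period, hlen with
      | [a, b, c, d], _ =>
        interval_cases r <;> simp [List.range_succ]
  | succ q ih =>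
      have h4 : 4 * (q + 1) + r = 4 + (4 * q + r) := by ring
      rw [h4, List.range_add, List.map_append, List.map_map]
      have h1 : (List.range 4).map (fun k => period.getD (k % 4) 0) = period := by
        match period, hlen with
        | [a, b, c, d], _ => simp [List.range_succ]
      have h2 : ((List.range (4 * q + r)).map ((fun k => period.getD (k % 4) 0) ∘ (fun i => 4 + i)))
          = (List.replicate q period).flatten ++ period.take r := by
        rw [← ih]
        apply List.map_congr_left
        intro k _
        simp [Function.comp, Nat.add_comm 4 k, Nat.add_mod_right]
      rw [h1, h2, List.replicate_succ, List.flatten_cons, List.append_assoc]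

theorem horizontal_cycle_34cfa167_eq (length lead tail bg : Int) :
    horizontal_cycle_34cfa167 length lead tail bg = horizontal_cycle_34cfa167_alt length lead tail bg := by
  unfold horizontal_cycle_34cfa167 horizontal_cycle_34cfa167_alt
  by_cases hle : length ≤ 0
  · simp [hle, PySem.List.pyRange_one_eq_nil (by omega : length ≤ 0)]
  · simp only [if_neg hle]
    have hpos : 0 < length := by omega
    obtain ⟨n, hn⟩ : ∃ n : Nat, length = (n : Int) := ⟨length.toNat, by omega⟩
    subst hn
    set period : List Int := [lead, bg, tail, bg] with hperiod
    have hq : PySem.Int.floordiv (n : Int) 4 = ((n / 4 : Nat) : Int) := by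
      exact_mod_cast PySem.Int.floordiv_natCast n 4
    have hm : PySem.Int.mod (n : Int) 4 = ((n % 4 : Nat) : Int) := by
      exact_mod_cast PySem.Int.mod_natCast n 4
    rw [hq, hm, PySem.List.slice_to _ (by positivity), PySem.List.pyRange_one]
    simp only [Int.sub_zero, Int.toNat_natCast, Int.zero_add, List.map_map, Int.toNat_natCast]
    have hmap : ∀ k : Nat,
        PySem.List.pyGetD period (PySem.Int.mod (k : Int) 4) 0 = period.getD (k % 4) 0 := by
      intro k
      have : PySem.Int.mod (k : Int) 4 = ((k % 4 : Nat) : Int) := by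
        exact_mod_cast PySem.Int.mod_natCast k 4
      rw [this, PySem.List.pyGetD_natCast]
    have hdecomp : n = 4 * (n / 4) + n % 4 := (Nat.div_add_mod n 4).symm ▸ by omega
    calc (List.range n).map ((fun idx => PySem.List.pyGetD period (PySem.Int.mod idx 4) 0) ∘ (fun k : Nat => (k : Int)))
        = (List.range n).map (fun k => period.getD (k % 4) 0) := by
          apply List.map_congr_left; intro k _
          simp only [Function.comp]; exact hmap k
      _ = (List.replicate (n / 4) period).flatten ++ period.take (n % 4) := by
          have h := pv_cycle_core period (by simp [hperiod]) (n / 4) (n % 4) (Nat.mod_lt _ (by omega))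
          rw [← hdecomp] at h
          exact h

-- ===== VERDICT (by name: the statement is the Claim_ definition above) =====
theorem horizontal_cycle_34cfa167_spec : Claim_equal_horizontal_cycle_34cfa167 := by
  intro length lead tail bg _
  unfold Spec_horizontal_cycle_34cfa167
  exact horizontal_cycle_34cfa167_eq length lead tail bg
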